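-- pv_equiv track=rewrite | github.com/raytriestodostuff/Amazon-Scraper | amz_scrp.py | parse_badge
-- ===== SOURCE A (Python) =====
-- def parse_badge(text):
--     """Parse badge by text pattern matching (fallback method)"""
--     lower = text.lower()
--     badge = {"raw_text": text, "badge_type": "Other", "rank": None, "category": None, "keyword": None}
--
--     # Use pattern matching for common keywords across languages
--     # Best Seller patterns
--     if any(pattern in lower for pattern in ["seller", "vendido", "ventes", "verkauf"]):
--         badge["badge_type"] = "Best Seller"
--     # Amazon's Choice patterns (including "Opción Amazon")
--     elif "amazon" in lower or "opción" in lower or "opcion" in lower or "choice" in lower or "elección" in lower or "wahl" in lower or "choix" in lower or "scelta" in lower: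
--         badge["badge_type"] = "Amazon's Choice"
--     # Climate/environment patterns
--     elif "climate" in lower or "clima" in lower or "klima" in lower:
--         badge["badge_type"] = "Climate Pledge Friendly"
--     # Limited time/deal patterns
--     elif any(pattern in lower for pattern in ["limited", "limitado", "limitée", "begrenzt", "limitata", "deal", "oferta", "offre"]):
--         badge["badge_type"] = "Limited Time Deal"
--     # Small business patterns
--     elif any(pattern in lower for pattern in ["small", "pequeña", "petite", "kleines", "piccola", "business", "empresa", "entreprise", "unternehmen", "impresa"]):
--         badge["badge_type"] = "Small Business"
--     else:
--         # If we can't categorize, just use the text as-is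
--         badge["badge_type"] = text
--
--     return badge
-- ===== SOURCE B (Python) =====
-- _PATTERN_TYPE = {
--     "seller": "Best Seller", "vendido": "Best Seller", "ventes": "Best Seller", "verkauf": "Best Seller",
--     "amazon": "Amazon's Choice", "opción": "Amazon's Choice", "opcion": "Amazon's Choice",
--     "choice": "Amazon's Choice", "elección": "Amazon's Choice", "wahl": "Amazon's Choice",
--     "choix": "Amazon's Choice", "scelta": "Amazon's Choice",
--     "climate": "Climate Pledge Friendly", "clima": "Climate Pledge Friendly", "klima": "Climate Pledge Friendly",
--     "limited": "Limited Time Deal", "limitado": "Limited Time Deal", "limitée": "Limited Time Deal",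
--     "begrenzt": "Limited Time Deal", "limitata": "Limited Time Deal", "deal": "Limited Time Deal",
--     "oferta": "Limited Time Deal", "offre": "Limited Time Deal",
--     "small": "Small Business", "pequeña": "Small Business", "petite": "Small Business",
--     "kleines": "Small Business", "piccola": "Small Business", "business": "Small Business",
--     "empresa": "Small Business", "entreprise": "Small Business", "unternehmen": "Small Business",
--     "impresa": "Small Business",
-- }
-- _PRIORITY = {"Best Seller": 0, "Amazon's Choice": 1, "Climate Pledge Friendly": 2,
--              "Limited Time Deal": 3, "Small Business": 4}
--
-- def parse_badge(text):
--     """Single flat scan over a pattern->type map, keeping the best-priority match."""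
--     lower = text.lower()
--     best = None
--     for pattern, btype in _PATTERN_TYPE.items():
--         if pattern in lower and (best is None or _PRIORITY[btype] < _PRIORITY[best]):
--             best = btype
--     return {"raw_text": text, "badge_type": best if best is not None else text,
--             "rank": None, "category": None, "keyword": None}
-- ===== Notes on version B (the rewrite author's own statement) =====
-- stated objective: alternative
-- what changed: Replaces the five-branch if/elif cascade (grouped pattern lists with first-match early exit) by a single exhaustive scan over a flat pattern->badge-type map with a numeric priority table, keeping the lowest-priority-number matching type in an accumulator; equal because patterns of equal priority map to the same type and strict-< replacement reproduces the cascade's priority order.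
import Mathlib
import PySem

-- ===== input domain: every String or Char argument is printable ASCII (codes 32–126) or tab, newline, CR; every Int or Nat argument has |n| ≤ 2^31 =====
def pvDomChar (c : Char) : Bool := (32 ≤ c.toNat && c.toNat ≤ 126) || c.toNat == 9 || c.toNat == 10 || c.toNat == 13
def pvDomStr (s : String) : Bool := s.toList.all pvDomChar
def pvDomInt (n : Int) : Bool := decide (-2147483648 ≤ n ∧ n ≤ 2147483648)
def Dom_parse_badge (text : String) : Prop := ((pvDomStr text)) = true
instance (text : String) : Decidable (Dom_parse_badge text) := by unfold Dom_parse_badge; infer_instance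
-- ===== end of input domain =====

-- B replaces the grouped if/elif first-match cascade by one exhaustive scan of a flat pattern->type map keeping the best-priority match (alternative; same cost).

-- ===== PORT A =====
def parse_badge (text : String) : List (String × Option String) :=
  let lower := PySem.Str.lower text
  let badge : PySem.Dict String (Option String) :=
    PySem.Dict.ofList [("raw_text", some text), ("badge_type", some "Other"),
                       ("rank", none), ("category", none), ("keyword", none)]
  let badge :=
    if ["seller", "vendido", "ventes", "verkauf"].any (fun p => PySem.Str.isIn p lower) then
      badge.insert "badge_type" (some "Best Seller")
    else if PySem.Str.isIn "amazon" lower || PySem.Str.isIn "opción" lower ||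
            PySem.Str.isIn "opcion" lower || PySem.Str.isIn "choice" lower ||
            PySem.Str.isIn "elección" lower || PySem.Str.isIn "wahl" lower ||
            PySem.Str.isIn "choix" lower || PySem.Str.isIn "scelta" lower then
      badge.insert "badge_type" (some "Amazon's Choice")
    else if PySem.Str.isIn "climate" lower || PySem.Str.isIn "clima" lower ||
            PySem.Str.isIn "klima" lower then
      badge.insert "badge_type" (some "Climate Pledge Friendly")
    else if ["limited", "limitado", "limitée", "begrenzt", "limitata", "deal", "oferta",
             "offre"].any (fun p => PySem.Str.isIn p lower) then
      badge.insert "badge_type" (some "Limited Time Deal")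
    else if ["small", "pequeña", "petite", "kleines", "piccola", "business", "empresa",
             "entreprise", "unternehmen", "impresa"].any (fun p => PySem.Str.isIn p lower) then
      badge.insert "badge_type" (some "Small Business")
    else
      badge.insert "badge_type" (some text)
  badge.items

-- ===== PORT B =====
def pvPatternType : List (String × String) :=
  [("seller", "Best Seller"), ("vendido", "Best Seller"), ("ventes", "Best Seller"), ("verkauf", "Best Seller"),
   ("amazon", "Amazon's Choice"), ("opción", "Amazon's Choice"), ("opcion", "Amazon's Choice"),
   ("choice", "Amazon's Choice"), ("elección", "Amazon's Choice"), ("wahl", "Amazon's Choice"),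
   ("choix", "Amazon's Choice"), ("scelta", "Amazon's Choice"),
   ("climate", "Climate Pledge Friendly"), ("clima", "Climate Pledge Friendly"), ("klima", "Climate Pledge Friendly"),
   ("limited", "Limited Time Deal"), ("limitado", "Limited Time Deal"), ("limitée", "Limited Time Deal"),
   ("begrenzt", "Limited Time Deal"), ("limitata", "Limited Time Deal"), ("deal", "Limited Time Deal"),
   ("oferta", "Limited Time Deal"), ("offre", "Limited Time Deal"),
   ("small", "Small Business"), ("pequeña", "Small Business"), ("petite", "Small Business"),
   ("kleines", "Small Business"), ("piccola", "Small Business"), ("business", "Small Business"),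
   ("empresa", "Small Business"), ("entreprise", "Small Business"), ("unternehmen", "Small Business"),
   ("impresa", "Small Business")]

def pvPriority : PySem.Dict String Int :=
  PySem.Dict.ofList [("Best Seller", 0), ("Amazon's Choice", 1), ("Climate Pledge Friendly", 2),
                     ("Limited Time Deal", 3), ("Small Business", 4)]

-- the loop body: replace `best` only on a match whose type has strictly smaller priority
def pvStep (lower : String) (best : Option String) (pt : String × String) : Option String :=
  if PySem.Str.isIn pt.1 lower &&
       (match best with
        | none => true
        | some b => decide (PySem.Dict.getD pvPriority pt.2 0 < PySem.Dict.getD pvPriority b 0)) then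
    some pt.2
  else best

def parse_badge_alt (text : String) : List (String × Option String) :=
  let lower := PySem.Str.lower text
  let best := pvPatternType.foldl (pvStep lower) none
  [("raw_text", some text),
   ("badge_type", some (match best with | some b => b | none => text)),
   ("rank", none), ("category", none), ("keyword", none)]

-- ===== PRECONDITION & SPEC =====
def Spec_parse_badge (text : String) (out : List (String × Option String)) : Prop := out = parse_badge_alt text
instance (text : String) (out : List (String × Option String)) : Decidable (Spec_parse_badge text out) := by unfold Spec_parse_badge; infer_instance

-- ===== CLAIM =====
def Claim_equal_parse_badge : Prop := ∀ (text : String), Dom_parse_badge text → Spec_parse_badge text (parse_badge text)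

-- ===== LEMMAS AND PROOFS =====

-- a group whose type equals the accumulator's type never replaces it (priority is not < itself)
theorem pvFold_same_type (lower t : String) (ps : List String) :
    (ps.map (fun p => (p, t))).foldl (pvStep lower) (some t) = some t := by
  induction ps with
  | nil => rfl
  | cons p ps ih =>
      simp only [List.map_cons, List.foldl_cons, pvStep, lt_self_iff_false, decide_false,
        Bool.and_false, Bool.false_eq_true, if_false]
      exact ih

-- a group none of whose patterns match is skipped
theorem pvFold_group_miss (lower t : String) (ps : List String) (rest : List (String × String))
    (h : (ps.any fun p => PySem.Str.isIn p lower) = false) :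
    ((ps.map (fun p => (p, t))) ++ rest).foldl (pvStep lower) none = rest.foldl (pvStep lower) none := by
  induction ps with
  | nil => rfl
  | cons p ps ih =>
      rw [List.any_cons, Bool.or_eq_false_iff] at h
      simp only [List.map_cons, List.cons_append, List.foldl_cons, pvStep,
        h.1, Bool.false_and, Bool.false_eq_true, if_false]
      exact ih h.2

-- a group with a matching pattern sets the accumulator to its type
theorem pvFold_group_hit (lower t : String) (ps : List String) (rest : List (String × String))
    (h : (ps.any fun p => PySem.Str.isIn p lower) = true) :
    ((ps.map (fun p => (p, t))) ++ rest).foldl (pvStep lower) none = rest.foldl (pvStep lower) (some t) := by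
  induction ps with
  | nil => simp at h
  | cons p ps ih =>
      by_cases hp : PySem.Str.isIn p lower = true
      · simp only [List.map_cons, List.cons_append, List.foldl_cons, pvStep, hp, Bool.and_true,
          if_true]
        rw [List.foldl_append, pvFold_same_type]
      · have hp' : PySem.Str.isIn p lower = false := by simpa using hp
        rw [List.any_cons, hp', Bool.false_or] at h
        simp only [List.map_cons, List.cons_append, List.foldl_cons, pvStep, hp',
          Bool.false_and, Bool.false_eq_true, if_false]
        exact ih h

-- once the accumulator holds a type whose priority is minimal among the remaining pairs, it is kept
theorem pvFold_keep (lower b : String) (l : List (String × String))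
    (h : ∀ x ∈ l, ¬ (PySem.Dict.getD pvPriority x.2 0 < PySem.Dict.getD pvPriority b 0)) :
    l.foldl (pvStep lower) (some b) = some b := by
  induction l with
  | nil => rfl
  | cons x l ih =>
      have hx := h x (List.mem_cons_self ..)
      simp only [List.foldl_cons, pvStep, decide_eq_false hx, Bool.and_false,
        Bool.false_eq_true, if_false]
      exact ih (fun y hy => h y (List.mem_cons_of_mem _ hy))

-- ===== VERDICT =====
set_option maxHeartbeats 2000000 in
theorem parse_badge_spec : Claim_equal_parse_badge := by
  intro text _
  unfold Spec_parse_badge parse_badge parse_badge_alt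
  have htable : pvPatternType =
      (["seller", "vendido", "ventes", "verkauf"].map (fun p => (p, "Best Seller"))) ++
      ((["amazon", "opción", "opcion", "choice", "elección", "wahl", "choix", "scelta"].map
          (fun p => (p, "Amazon's Choice"))) ++
      ((["climate", "clima", "klima"].map (fun p => (p, "Climate Pledge Friendly"))) ++
      ((["limited", "limitado", "limitée", "begrenzt", "limitata", "deal", "oferta", "offre"].map
          (fun p => (p, "Limited Time Deal"))) ++
      ((["small", "pequeña", "petite", "kleines", "piccola", "business", "empresa",
         "entreprise", "unternehmen", "impresa"].map (fun p => (p, "Small Business"))) ++ [])))) := by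
    rfl
  rw [htable]
  set lower := PySem.Str.lower text with hlower
  dsimp only
  split_ifs with h1 h2 h3 h4 h5 <;>
    (clear htable hlower; simp only [Bool.not_eq_true, Bool.or_assoc] at *)
  · rw [pvFold_group_hit _ _ _ _ h1, pvFold_keep _ _ _ (by decide)]
    rfl
  · rw [pvFold_group_miss _ _ _ _ h1,
        pvFold_group_hit _ _ _ _ (by simp only [List.any_cons, List.any_nil, Bool.or_false]; exact h2),
        pvFold_keep _ _ _ (by decide)]
    rfl
  · rw [pvFold_group_miss _ _ _ _ h1,
        pvFold_group_miss _ _ _ _ (by simp only [List.any_cons, List.any_nil, Bool.or_false]; exact h2),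
        pvFold_group_hit _ _ _ _ (by simp only [List.any_cons, List.any_nil, Bool.or_false]; exact h3),
        pvFold_keep _ _ _ (by decide)]
    rfl
  · rw [pvFold_group_miss _ _ _ _ h1,
        pvFold_group_miss _ _ _ _ (by simp only [List.any_cons, List.any_nil, Bool.or_false]; exact h2),
        pvFold_group_miss _ _ _ _ (by simp only [List.any_cons, List.any_nil, Bool.or_false]; exact h3),
        pvFold_group_hit _ _ _ _ h4,
        pvFold_keep _ _ _ (by decide)]
    rfl
  · rw [pvFold_group_miss _ _ _ _ h1,
        pvFold_group_miss _ _ _ _ (by simp only [List.any_cons, List.any_nil, Bool.or_false]; exact h2),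
        pvFold_group_miss _ _ _ _ (by simp only [List.any_cons, List.any_nil, Bool.or_false]; exact h3),
        pvFold_group_miss _ _ _ _ h4,
        pvFold_group_hit _ _ _ _ h5]
    rfl
  · rw [pvFold_group_miss _ _ _ _ h1,
        pvFold_group_miss _ _ _ _ (by simp only [List.any_cons, List.any_nil, Bool.or_false]; exact h2),
        pvFold_group_miss _ _ _ _ (by simp only [List.any_cons, List.any_nil, Bool.or_false]; exact h3),
        pvFold_group_miss _ _ _ _ h4,
        pvFold_group_miss _ _ _ _ h5]
    rfl
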